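-- pv_equiv track=rewrite | github.com/JackZhao516/smrti_quant_alerts | smrti_quant_alerts/llm_api/llm_api.py | _get_max_timeframe
-- ===== SOURCE A (Python) =====
-- from typing import Tuple, List, Union
--
-- def _get_max_timeframe(timeframe: List[str]) -> str:
--     """
--     get max timeframe
--
--     :param timeframe: list of timeframe
--     :return: max timeframe
--     """
--     if not timeframe:
--         return ""
--     years = [timeframe[i] for i in range(len(timeframe)) if "Y" in timeframe[i].upper()]
--     if years:
--         return max(years)
--     months = [timeframe[i] for i in range(len(timeframe)) if "M" in timeframe[i].upper()]
--     if months: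
--         return max(months)
--     days = [timeframe[i] for i in range(len(timeframe)) if "D" in timeframe[i].upper()]
--     if days:
--         return max(days)
--     hours = [timeframe[i] for i in range(len(timeframe)) if "H" in timeframe[i].upper()]
--     if hours:
--         return max(hours)
--     return timeframe[0]
-- ===== SOURCE B (Python) =====
-- def _get_max_timeframe(timeframe):
--     """Single pass: keep a running lexicographic max per priority letter, then
--     return the first present letter's max in priority order Y, M, D, H."""
--     y = m = d = h = None
--     for tf in timeframe:
--         up = tf.upper()
--         if "Y" in up and (y is None or y < tf):
--             y = tf
--         if "M" in up and (m is None or m < tf):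
--             m = tf
--         if "D" in up and (d is None or d < tf):
--             d = tf
--         if "H" in up and (h is None or h < tf):
--             h = tf
--     if not timeframe:
--         return ""
--     for best in (y, m, d, h):
--         if best is not None:
--             return best
--     return timeframe[0]
-- ===== Notes on version B (the rewrite author's own statement) =====
-- stated objective: faster
-- what changed: Replaces four sequential filter-then-max list-building passes (plus a pass per .upper call in each) with a single loop that maintains one running lexicographic maximum per priority letter and a priority-order lookup afterwards, building no intermediate lists.
import Mathlib
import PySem

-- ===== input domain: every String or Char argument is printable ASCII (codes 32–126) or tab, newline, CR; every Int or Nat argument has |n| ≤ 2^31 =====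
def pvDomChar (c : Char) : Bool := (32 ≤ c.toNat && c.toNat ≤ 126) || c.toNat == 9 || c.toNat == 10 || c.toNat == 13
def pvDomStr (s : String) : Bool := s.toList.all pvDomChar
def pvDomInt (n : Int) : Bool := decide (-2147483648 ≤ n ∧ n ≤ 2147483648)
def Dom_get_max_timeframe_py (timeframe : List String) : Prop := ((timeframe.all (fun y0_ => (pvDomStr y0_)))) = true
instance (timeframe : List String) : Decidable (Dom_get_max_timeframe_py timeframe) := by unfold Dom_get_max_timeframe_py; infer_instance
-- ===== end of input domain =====

-- B replaces A's four filter-then-max passes by ONE loop keeping a running max per priority letter; return values agree everywhere.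

-- ===== PORT A =====
def get_max_timeframe_py (timeframe : List String) : String :=
  if timeframe = [] then ""
  else
    let years := (PySem.List.pyRange 0 (PySem.List.len timeframe) 1).foldl
      (fun acc i => if PySem.Str.isIn "Y" (PySem.Str.upper (PySem.List.pyGetD timeframe i "")) then acc ++ [PySem.List.pyGetD timeframe i ""] else acc) []
    if years ≠ [] then (PySem.List.max? years (fun y => y)).getD ""
    else
      let months := (PySem.List.pyRange 0 (PySem.List.len timeframe) 1).foldl
        (fun acc i => if PySem.Str.isIn "M" (PySem.Str.upper (PySem.List.pyGetD timeframe i "")) then acc ++ [PySem.List.pyGetD timeframe i ""] else acc) []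
      if months ≠ [] then (PySem.List.max? months (fun y => y)).getD ""
      else
        let days := (PySem.List.pyRange 0 (PySem.List.len timeframe) 1).foldl
          (fun acc i => if PySem.Str.isIn "D" (PySem.Str.upper (PySem.List.pyGetD timeframe i "")) then acc ++ [PySem.List.pyGetD timeframe i ""] else acc) []
        if days ≠ [] then (PySem.List.max? days (fun y => y)).getD ""
        else
          let hours := (PySem.List.pyRange 0 (PySem.List.len timeframe) 1).foldl
            (fun acc i => if PySem.Str.isIn "H" (PySem.Str.upper (PySem.List.pyGetD timeframe i "")) then acc ++ [PySem.List.pyGetD timeframe i ""] else acc) []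
          if hours ≠ [] then (PySem.List.max? hours (fun y => y)).getD ""
          else PySem.List.pyGetD timeframe 0 ""

-- ===== PORT B =====
-- 'if <letter> in up and (o is None or o < tf): o = tf'
def gmtUpd (c : String) (tf up : String) (o : Option String) : Option String :=
  if PySem.Str.isIn c up && (match o with | none => true | some v => decide (v < tf)) then some tf else o

def get_max_timeframe_py_alt (timeframe : List String) : String :=
  let st := timeframe.foldl
    (fun (st : Option String × Option String × Option String × Option String) tf =>
      let up := PySem.Str.upper tf
      (gmtUpd "Y" tf up st.1, gmtUpd "M" tf up st.2.1, gmtUpd "D" tf up st.2.2.1, gmtUpd "H" tf up st.2.2.2))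
    (none, none, none, none)
  if timeframe = [] then ""
  else
    match st.1, st.2.1, st.2.2.1, st.2.2.2 with
    | some v, _, _, _ => v
    | none, some v, _, _ => v
    | none, none, some v, _ => v
    | none, none, none, some v => v
    | none, none, none, none => PySem.List.pyGetD timeframe 0 ""

-- ===== PRECONDITION & SPEC =====
def Spec_get_max_timeframe_py (timeframe : List String) (out : String) : Prop := out = get_max_timeframe_py_alt timeframe
instance (timeframe : List String) (out : String) : Decidable (Spec_get_max_timeframe_py timeframe out) := by unfold Spec_get_max_timeframe_py; infer_instance

-- ===== CLAIM (what is proved, stated in full; the proofs are below) =====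
def Claim_equal_get_max_timeframe_py : Prop := ∀ (timeframe : List String), Dom_get_max_timeframe_py timeframe → Spec_get_max_timeframe_py timeframe (get_max_timeframe_py timeframe)

-- ===== LEMMAS AND PROOFS =====

def gmtP (c : String) (s : String) : Bool := PySem.Str.isIn c (PySem.Str.upper s)

def gmtFold (c : String) (l : List String) (o : Option String) : Option String :=
  l.foldl (fun o tf => gmtUpd c tf (PySem.Str.upper tf) o) o

theorem genFold_some (p : String → Bool) (l : List String) (a : String) :
    l.foldl (fun o tf => if (p tf && (match o with | none => true | some v => decide (v < tf))) = true then some tf else o) (some a)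
    = some ((l.filter p).foldl max a) := by
  induction l generalizing a with
  | nil => rfl
  | cons x t ih =>
    simp only [List.foldl, List.filter_cons]
    by_cases hp : p x = true
    · by_cases hlt : a < x
      · have ih' := ih x
        simp only [hp, hlt, decide_true, Bool.true_and, if_true, List.foldl_cons,
          max_eq_right (le_of_lt hlt)] at ih' ⊢
        simp at ih' ⊢
        exact ih'
      · have ih' := ih a
        simp only [hp, hlt, decide_false, Bool.true_and] at ih' ⊢
        simp at ih' ⊢
        rw [max_eq_left (le_of_not_gt hlt)]
        exact ih'
    · simp only [Bool.not_eq_true] at hp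
      have ih' := ih a
      simp only [hp, Bool.false_and] at ih' ⊢
      simp at ih' ⊢
      exact ih'

theorem genFold_none (p : String → Bool) (l : List String) :
    l.foldl (fun o tf => if (p tf && (match o with | none => true | some v => decide (v < tf))) = true then some tf else o) none
    = (match l.filter p with
       | [] => none
       | y :: t => some (t.foldl max y)) := by
  induction l with
  | nil => rfl
  | cons x t ih =>
    simp only [List.foldl, List.filter_cons]
    by_cases hp : p x = true
    · have h := genFold_some p t x
      simp only [hp, Bool.and_true] at h ⊢
      simp at h ⊢
      exact h
    · simp only [Bool.not_eq_true] at hp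
      simp only [hp, Bool.false_and] at ih ⊢
      simp at ih ⊢
      exact ih

theorem gmtFold_none (c : String) (l : List String) :
    gmtFold c l none = (match l.filter (gmtP c) with
      | [] => none
      | y :: t => some (t.foldl max y)) :=
  genFold_none (gmtP c) l

theorem gmtTuple (l : List String) (st : Option String × Option String × Option String × Option String) :
    l.foldl
      (fun (st : Option String × Option String × Option String × Option String) tf =>
        let up := PySem.Str.upper tf
        (gmtUpd "Y" tf up st.1, gmtUpd "M" tf up st.2.1, gmtUpd "D" tf up st.2.2.1, gmtUpd "H" tf up st.2.2.2)) st
    = (gmtFold "Y" l st.1, gmtFold "M" l st.2.1, gmtFold "D" l st.2.2.1, gmtFold "H" l st.2.2.2) := by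
  induction l generalizing st with
  | nil => rfl
  | cons x t ih => simp only [List.foldl_cons, ih, gmtFold]

theorem gmtComprehension (c : String) (timeframe : List String) :
    (PySem.List.pyRange 0 (PySem.List.len timeframe) 1).foldl
      (fun acc i => if PySem.Str.isIn c (PySem.Str.upper (PySem.List.pyGetD timeframe i "")) then acc ++ [PySem.List.pyGetD timeframe i ""] else acc) []
    = timeframe.filter (gmtP c) := by
  rw [PySem.List.foldl_pyRange_zero_pyGetD timeframe ""
        (fun acc x => if PySem.Str.isIn c (PySem.Str.upper x) then acc ++ [x] else acc) []]
  rw [PySem.List.foldl_append_if_eq_filter]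
  rfl

theorem gmtMax (y : String) (t : List String) :
    (PySem.List.max? (y :: t) (fun s => s)).getD "" = t.foldl max y := by
  rw [PySem.List.max?_id_cons]; rfl

-- ===== VERDICT (by name: the statement is the Claim_ definition above) =====
theorem get_max_timeframe_py_spec : Claim_equal_get_max_timeframe_py := by
  intro timeframe _
  unfold Spec_get_max_timeframe_py get_max_timeframe_py get_max_timeframe_py_alt
  by_cases hnil : timeframe = []
  · simp [hnil]
  · simp only [gmtTuple, gmtComprehension, gmtFold_none, hnil, if_false]
    cases hY : timeframe.filter (gmtP "Y") with
    | cons y t => simp [gmtMax]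
    | nil =>
      cases hM : timeframe.filter (gmtP "M") with
      | cons y t => simp [gmtMax]
      | nil =>
        cases hD : timeframe.filter (gmtP "D") with
        | cons y t => simp [gmtMax]
        | nil =>
          cases hH : timeframe.filter (gmtP "H") with
          | cons y t => simp [gmtMax]
          | nil => simp
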